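-- pv_equiv track=rewrite | github.com/LK00100100/italianquestions | q2ranks.py | solution
-- ===== SOURCE A (Python) =====
-- def solution(ranks: list):
--     """
--     O(2n) => O(n)
--     :param ranks: int list of ranks of soldiers
--     :return:
--     """
--     count_reporting = 0
--     rank_set = set()
--     for rank in ranks:
--         rank_set.add(rank)
--
--     for rank in ranks:
--         # leader check
--         if rank + 1 in rank_set:
--             count_reporting += 1
--
--     return count_reporting
-- ===== SOURCE B (Python) =====
-- def solution(ranks: list):
--     # One counting pass, then sort the distinct ranks and do a single
--     # adjacency scan: in the strictly increasing sorted values, rank+1 is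
--     # present exactly when it is the NEXT sorted value, so add that value's
--     # multiplicity whenever consecutive sorted values differ by 1.
--     cnt = {}
--     for r in ranks:
--         cnt[r] = cnt.get(r, 0) + 1
--     vals = sorted(cnt)
--     total = 0
--     for a, b in zip(vals, vals[1:]):
--         if b == a + 1:
--             total += cnt[a]
--     return total
-- ===== Notes on version B (the rewrite author's own statement) =====
-- stated objective: alternative
-- what changed: B sorts the distinct ranks and does one adjacency scan over consecutive sorted values (adding a value's multiplicity when its successor is literally the next sorted value), replacing A's hash-set build plus per-element successor-membership scan with a sort-then-scan algorithm.
import Mathlib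
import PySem

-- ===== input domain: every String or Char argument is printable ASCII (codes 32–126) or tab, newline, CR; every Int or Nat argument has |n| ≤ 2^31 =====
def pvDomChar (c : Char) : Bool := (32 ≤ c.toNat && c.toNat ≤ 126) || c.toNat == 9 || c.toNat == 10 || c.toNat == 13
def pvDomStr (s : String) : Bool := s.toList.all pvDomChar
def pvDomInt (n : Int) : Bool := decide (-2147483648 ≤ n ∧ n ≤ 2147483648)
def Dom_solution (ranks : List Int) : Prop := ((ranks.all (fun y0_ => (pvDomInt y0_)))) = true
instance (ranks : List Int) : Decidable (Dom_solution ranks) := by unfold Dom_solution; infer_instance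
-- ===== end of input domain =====

-- B replaces A's hash-set build + per-element successor-membership scan by a sort of the
-- distinct ranks and ONE adjacency scan over consecutive sorted values, weighted by
-- multiplicity (alternative algorithm; correct because in a strictly increasing integer
-- list v+1 is present exactly when it is the next element).

-- ===== PORT A =====
def solution (ranks : List Int) : Int :=
  let rankSet := ranks.foldl (fun s r => PySem.Set.add s r) PySem.Set.empty
  ranks.foldl (fun acc r => if PySem.Set.contains rankSet (r + 1) then acc + 1 else acc) 0

-- ===== PORT B =====
-- cnt[a] is exact as getD: every scanned a is a key of cnt, so Python's lookup cannot raise.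
def solution_alt (ranks : List Int) : Int :=
  let cnt := ranks.foldl (fun d r => d.insert r (d.getD r 0 + 1)) (PySem.Dict.empty : PySem.Dict Int Int)
  let vals := PySem.List.sorted cnt.keys (fun x => x) false
  (vals.zip (PySem.List.slice vals (some 1) none)).foldl
    (fun total ab => if ab.2 = ab.1 + 1 then total + cnt.getD ab.1 0 else total) 0

-- ===== PRECONDITION & SPEC =====
def Spec_solution (ranks : List Int) (out : Int) : Prop := out = solution_alt ranks
instance (ranks : List Int) (out : Int) : Decidable (Spec_solution ranks out) := by unfold Spec_solution; infer_instance

-- ===== CLAIM (what is proved, stated in full; the proofs are below) =====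
def Claim_equal_solution : Prop := ∀ (ranks : List Int), Dom_solution ranks → Spec_solution ranks (solution ranks)

-- ===== LEMMAS AND PROOFS =====

-- A's counting loop is the countP of the successor-membership predicate.
lemma solution_eq_countP (ranks : List Int) :
    solution ranks = (ranks.countP (fun r => decide ((r + 1) ∈ ranks)) : Int) := by
  show List.foldl
      (fun acc r => if PySem.Set.contains (PySem.Set.ofList ranks) (r + 1) then acc + 1 else acc)
      0 ranks = _
  rw [PySem.List.foldl_congr_mem ranks _
    (fun acc r => if decide ((r + 1) ∈ ranks) then acc + 1 else acc) 0
    (by intro acc r _; simp [PySem.Set.contains_eq_listContains, PySem.Set.mem_ofList])]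
  rw [PySem.List.foldl_count_if]
  simp

-- B's adjacency scan over a strictly increasing list sums c over the values whose
-- successor is a member.
lemma adjScan (c : Int → Int) :
    ∀ (l : List Int) (t : Int), l.Pairwise (· < ·) →
      (l.zip l.tail).foldl (fun t ab => if ab.2 = ab.1 + 1 then t + c ab.1 else t) t
        = t + ((l.filter (fun v => decide ((v + 1) ∈ l))).map c).sum := by
  intro l
  induction l with
  | nil => intro t _; simp
  | cons a l' ih =>
    intro t h
    cases l' with
    | nil => simp
    | cons b rest =>
      have hcons := List.pairwise_cons.mp h
      have hab : a < b := hcons.1 b (by simp)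
      have htail : (b :: rest).Pairwise (· < ·) := hcons.2
      have hbrest : ∀ x ∈ rest, b < x := fun x hx => (List.pairwise_cons.mp htail).1 x hx
      have hmemA : ((a + 1) ∈ a :: b :: rest) ↔ b = a + 1 := by
        simp only [List.mem_cons]
        constructor
        · rintro (h1 | h1 | h1)
          · omega
          · omega
          · exact absurd (hbrest _ h1) (by omega)
        · intro hb; right; left; omega
      have htailpred : (b :: rest).filter (fun v => decide ((v + 1) ∈ a :: b :: rest))
          = (b :: rest).filter (fun v => decide ((v + 1) ∈ b :: rest)) := by
        apply List.filter_congr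
        intro v hv
        have hbv : b ≤ v := by
          rcases List.mem_cons.mp hv with h1 | h1
          · omega
          · exact le_of_lt (hbrest _ h1)
        simp only [decide_eq_decide, List.mem_cons]
        constructor
        · rintro (h1 | h1)
          · omega
          · exact h1
        · intro h1; right; exact h1
      have hzip : ((a :: b :: rest).zip (a :: b :: rest).tail)
          = (a, b) :: ((b :: rest).zip (b :: rest).tail) := rfl
      have hfa : (a :: b :: rest).filter (fun v => decide ((v + 1) ∈ a :: b :: rest))
          = (if b = a + 1 then [a] else [])
            ++ (b :: rest).filter (fun v => decide ((v + 1) ∈ b :: rest)) := by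
        rw [List.filter_cons, htailpred]
        by_cases hb : b = a + 1 <;> simp [hmemA, hb]
      rw [hzip, List.foldl_cons, ih _ htail, hfa]
      by_cases hb : b = a + 1
      · rw [if_pos (show (a, b).2 = (a, b).1 + 1 from hb), if_pos hb]
        simp only [List.singleton_append, List.map_cons, List.sum_cons]
        ring
      · rw [if_neg (show ¬((a, b).2 = (a, b).1 + 1) from hb), if_neg hb]
        simp

-- B is the weighted adjacency scan, which equals the same countP.
lemma solution_alt_eq_countP (ranks : List Int) :
    solution_alt ranks = (ranks.countP (fun r => decide ((r + 1) ∈ ranks)) : Int) := by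
  have hbody : solution_alt ranks
      = ((PySem.List.sorted (PySem.Set.ofList ranks) (fun x => x) false).zip
          ((PySem.List.sorted (PySem.Set.ofList ranks) (fun x => x) false).tail)).foldl
        (fun total ab => if ab.2 = ab.1 + 1
          then total + (PySem.Dict.counter ranks).getD ab.1 0 else total) 0 := by
    simp only [solution_alt, PySem.List.slice_from_one,
      PySem.Dict.foldl_insert_getD_add_one_eq_counter, PySem.Dict.keys_counter]
  rw [hbody]
  rw [adjScan (fun a => (PySem.Dict.counter ranks).getD a 0) _ 0
    (PySem.List.sorted_ofList_pairwise_lt ranks)]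
  have hpred : (fun v : Int => decide ((v + 1) ∈
        PySem.List.sorted (PySem.Set.ofList ranks) (fun x => x) false))
      = (fun v : Int => decide ((v + 1) ∈ ranks)) := by
    funext v
    simp [PySem.List.mem_sorted, PySem.Set.mem_ofList]
  rw [hpred]
  have hnodup : (PySem.List.sorted (PySem.Set.ofList ranks) (fun x => x) false).Nodup :=
    (PySem.List.sorted_perm _ _ _).nodup_iff.mpr (PySem.Set.nodup_ofList ranks)
  have hperm : (PySem.List.sorted (PySem.Set.ofList ranks) (fun x => x) false).Perm ranks.dedup :=
    (List.perm_ext_iff_of_nodup hnodup ranks.nodup_dedup).mpr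
      (by intro x; simp [PySem.List.mem_sorted, PySem.Set.mem_ofList, List.mem_dedup])
  rw [((hperm.filter _).map (fun a => (PySem.Dict.counter ranks).getD a 0)).sum_eq]
  have := List.sum_map_count_dedup_filter_eq_countP (fun r : Int => decide ((r + 1) ∈ ranks)) ranks
  have hmap : (ranks.dedup.filter (fun v => decide ((v + 1) ∈ ranks))).map
        (fun a => (PySem.Dict.counter ranks).getD a 0)
      = (ranks.dedup.filter (fun v => decide ((v + 1) ∈ ranks))).map
        (fun a => ((ranks.count a : Nat) : Int)) := by
    apply List.map_congr_left; intro x _; rw [PySem.Dict.getD_counter]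
  rw [hmap, zero_add, ← this]
  push_cast
  rw [List.map_map]
  rfl

-- ===== VERDICT (by name: the statement is the Claim_ definition above) =====
theorem solution_spec : Claim_equal_solution := by
  intro ranks _
  unfold Spec_solution
  rw [solution_eq_countP, solution_alt_eq_countP]
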